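-- pv_equiv track=rewrite | github.com/Amoonguses1/Leetcode | python/2610_convert_an_array_into_a_2d_array_with_conditions.py | findMatrix2
-- ===== SOURCE A (Python) =====
-- from typing import List
-- from collections import Counter
--
-- def findMatrix2(nums: List[int]) -> List[List[int]]:
--     # Time: O(N^2)
--     # Space: O(N)
--     # N = len(nums)
--     numsCount = Counter(nums)
--     freq = max(numsCount.values())
--     ans = []
--     for i in range(freq):
--         cur = []
--         for num, val in numsCount.items():
--             if val >= freq - i:
--                 cur.append(num)
--         ans.append(cur)
--     return ans
-- ===== SOURCE B (Python) =====
-- from typing import List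
-- from collections import Counter
--
-- def findMatrix2(nums: List[int]) -> List[List[int]]:
--     # One pass over the distinct numbers: a number with count c goes into the
--     # last c rows (rows freq-c .. freq-1).
--     numsCount = Counter(nums)
--     freq = max(numsCount.values())
--     ans = [[] for _ in range(freq)]
--     for num, c in numsCount.items():
--         for i in range(freq - c, freq):
--             ans[i].append(num)
--     return ans
-- ===== Notes on version B (the rewrite author's own statement) =====
-- stated objective: alternative
-- what changed: Instead of scanning all distinct numbers once per row (one filtering pass per row), B allocates the freq empty rows up front and, in a single pass over the Counter, appends each number with count c directly to the last c rows; the total number of appends equals len(nums).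
import Mathlib
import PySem

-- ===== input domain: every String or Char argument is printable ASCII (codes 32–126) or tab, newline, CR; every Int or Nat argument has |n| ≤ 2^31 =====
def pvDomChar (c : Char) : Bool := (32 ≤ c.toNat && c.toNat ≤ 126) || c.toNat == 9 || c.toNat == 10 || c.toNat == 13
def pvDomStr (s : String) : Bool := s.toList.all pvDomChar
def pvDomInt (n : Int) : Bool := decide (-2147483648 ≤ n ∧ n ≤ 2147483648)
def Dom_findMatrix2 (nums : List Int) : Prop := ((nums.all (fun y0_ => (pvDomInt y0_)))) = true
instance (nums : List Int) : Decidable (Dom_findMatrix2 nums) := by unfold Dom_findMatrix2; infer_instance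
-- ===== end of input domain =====

-- B replaces A's per-row scan of all distinct numbers (one scan per row) with a single
-- pass over the Counter that appends each number with count c to the last c rows.

-- ===== PORT A =====
-- Counter(nums); freq = max(values); row i = numbers whose count ≥ freq - i, in Counter order.
def findMatrix2 (nums : List Int) : List (List Int) :=
  let numsCount := PySem.Dict.counter nums
  -- max(values) raises ValueError on empty nums; Pre_ excludes that, so the getD 0 arm is never the claimed value
  let freq := (PySem.List.max? numsCount.values (fun v => v)).getD 0
  (PySem.List.pyRange 0 freq 1).foldl
    (fun ans i =>
      ans ++ [numsCount.items.foldl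
        (fun cur p => if p.2 ≥ freq - i then cur ++ [p.1] else cur) []])
    []

-- ===== PORT B =====
-- ans[i].append(num): the index i is always in range (0 ≤ freq - c since c ≤ freq = max,
-- and i < freq = len ans), so the total pyGetD/pySetD forms are exact here.
def pvSetApp (rows : List (List Int)) (i : Int) (num : Int) : List (List Int) :=
  PySem.List.pySetD rows i ((PySem.List.pyGetD rows i []) ++ [num])

def findMatrix2_alt (nums : List Int) : List (List Int) :=
  let numsCount := PySem.Dict.counter nums
  let freq := (PySem.List.max? numsCount.values (fun v => v)).getD 0
  numsCount.items.foldl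
    (fun ans p =>
      (PySem.List.pyRange (freq - p.2) freq 1).foldl (fun a i => pvSetApp a i p.1) ans)
    (List.replicate freq.toNat [])

-- ===== PRECONDITION & SPEC =====
-- Pre_ excludes only the empty list, on which Python's max(...) raises ValueError (in A and in B alike).
def Pre_findMatrix2 (nums : List Int) : Prop := nums ≠ []
instance (nums : List Int) : Decidable (Pre_findMatrix2 nums) := by unfold Pre_findMatrix2; infer_instance
def pvWitness_findMatrix2 : List Int := ([1, 3, 4, 1, 2, 3, 1])

def Spec_findMatrix2 (nums : List Int) (out : List (List Int)) : Prop := out = findMatrix2_alt nums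
instance (nums : List Int) (out : List (List Int)) : Decidable (Spec_findMatrix2 nums out) := by unfold Spec_findMatrix2; infer_instance

-- ===== CLAIM (what is proved, stated in full; the proofs are below) =====
def Claim_equal_findMatrix2 : Prop := ∀ (nums : List Int), Dom_findMatrix2 nums → Pre_findMatrix2 nums → Spec_findMatrix2 nums (findMatrix2 nums)

-- ===== LEMMAS AND PROOFS =====

-- One inner loop of B ('for i in range(a, b): ans[i].append(num)'), read off index-wise.
theorem pv_inner_get (num : Int) (b : Int) :
    ∀ (n : Nat) (a : Int), 0 ≤ a → (b - a).toNat = n →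
    ∀ (rows : List (List Int)) (j : Nat),
      ((PySem.List.pyRange a b 1).foldl (fun r i => pvSetApp r i num) rows)[j]?
      = Option.map (fun r => if a ≤ (j : Int) ∧ (j : Int) < b then r ++ [num] else r) rows[j]? := by
  intro n
  induction n with
  | zero =>
    intro a ha hn rows j
    rw [PySem.List.pyRange_one_eq_nil (by omega)]
    simp only [List.foldl_nil]
    cases h : rows[j]? with
    | none => simp
    | some r =>
      have : ¬ (a ≤ (j : Int) ∧ (j : Int) < b) := by omega
      simp [this]
  | succ n ih =>
    intro a ha hn rows j
    rw [PySem.List.pyRange_one_cons (by omega)]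
    simp only [List.foldl_cons]
    rw [ih (a + 1) (by omega) (by omega)]
    have hcast : ((a.toNat : Nat) : Int) = a := Int.toNat_of_nonneg ha
    have hset : (pvSetApp rows a num)[j]?
        = if a.toNat = j then (if a.toNat < rows.length then some ((PySem.List.pyGetD rows a []) ++ [num]) else none) else rows[j]? := by
      unfold pvSetApp
      rw [PySem.List.pySetD_of_nonneg _ _ ha, List.getElem?_set]
    by_cases hj : a.toNat = j
    · subst hj
      rw [if_pos rfl] at hset
      rw [hset]
      by_cases hlen : a.toNat < rows.length
      · rw [if_pos hlen]
        have hget : rows[a.toNat]? = some (rows.getD a.toNat []) := by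
          rw [List.getD_eq_getElem?_getD, List.getElem?_eq_getElem hlen]; rfl
        have hgd : PySem.List.pyGetD rows a [] = rows.getD a.toNat [] := by
          conv_lhs => rw [← hcast]
          rw [PySem.List.pyGetD_natCast]
        rw [hget, hgd, Option.map_some, Option.map_some, hcast]
        rw [if_neg (by omega : ¬ (a + 1 ≤ a ∧ a < b)), if_pos (by omega : a ≤ a ∧ a < b)]
      · rw [if_neg hlen]
        have hnone : rows[a.toNat]? = none := by rw [List.getElem?_eq_none_iff]; omega
        rw [hnone, Option.map_none, Option.map_none]
    · rw [if_neg hj] at hset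
      rw [hset]
      cases rows[j]? with
      | none => rw [Option.map_none, Option.map_none]
      | some r =>
        rw [Option.map_some, Option.map_some]
        have : (a + 1 ≤ (j : Int) ∧ (j : Int) < b) ↔ (a ≤ (j : Int) ∧ (j : Int) < b) := by omega
        simp only [this]

-- The whole of B's fold over the counter items, read off index-wise.
theorem pv_outer_get (F : Int) :
    ∀ (ps : List (Int × Int)), (∀ p ∈ ps, p.2 ≤ F) →
    ∀ (rows : List (List Int)) (j : Nat),
      (ps.foldl (fun ans p =>
          (PySem.List.pyRange (F - p.2) F 1).foldl (fun a i => pvSetApp a i p.1) ans) rows)[j]?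
      = Option.map (fun r =>
          r ++ (ps.filter (fun p => decide (F - (j : Int) ≤ p.2 ∧ (j : Int) < F))).map (·.1)) rows[j]? := by
  intro ps
  induction ps with
  | nil =>
    intro _ rows j
    simp only [List.foldl_nil, List.filter_nil, List.map_nil, List.append_nil]
    cases rows[j]? <;> rfl
  | cons p ps ih =>
    intro hps rows j
    simp only [List.foldl_cons]
    rw [ih (fun q hq => hps q (List.mem_cons_of_mem _ hq))]
    rw [pv_inner_get p.1 F ((F - (F - p.2)).toNat) (F - p.2) (by have := hps p (List.mem_cons_self) ; omega) rfl]
    rw [Option.map_map]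
    cases rows[j]? with
    | none => rw [Option.map_none, Option.map_none]
    | some r =>
      rw [Option.map_some, Option.map_some]
      congr 1
      show (if F - p.2 ≤ (j : Int) ∧ (j : Int) < F then r ++ [p.1] else r) ++ _ = _
      rw [List.filter_cons]
      by_cases hc : F - p.2 ≤ (j : Int) ∧ (j : Int) < F
      · rw [if_pos hc, if_pos (by simpa using (by omega : F - (j : Int) ≤ p.2 ∧ (j : Int) < F))]
        simp
      · rw [if_neg hc, if_neg (by simpa using (by omega : ¬ (F - (j : Int) ≤ p.2 ∧ (j : Int) < F)))]

theorem pv_final (nums : List Int) (hne : nums ≠ []) :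
    findMatrix2 nums = findMatrix2_alt nums := by
  unfold findMatrix2 findMatrix2_alt
  simp only []
  set cnt := PySem.Dict.counter nums with hcnt
  have hvne : cnt.values ≠ [] := by
    have hxne : PySem.Set.ofList nums ≠ [] := by
      cases nums with
      | nil => exact absurd rfl hne
      | cons x xs =>
        intro h
        have : x ∈ PySem.Set.ofList (x :: xs) := by
          rw [PySem.Set.mem_ofList]; exact List.mem_cons_self
        rw [h] at this; exact List.not_mem_nil this
    intro h
    apply hxne
    have := PySem.Dict.items_counter nums
    have hv : cnt.values = (PySem.Set.ofList nums).map (fun k => ((nums.count k : Int))) := by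
      show cnt.items.map (·.2) = _
      rw [hcnt, this, List.map_map]; rfl
    rw [hv] at h
    exact List.map_eq_nil_iff.mp h
  obtain ⟨m, hm⟩ : ∃ m, PySem.List.max? cnt.values (fun v => v) = some m := by
    cases h : PySem.List.max? cnt.values (fun v => v) with
    | none => exact absurd ((PySem.List.max?_eq_none_iff _ _).mp h) hvne
    | some m => exact ⟨m, rfl⟩
  rw [hm]
  simp only [Option.getD_some]
  have hle : ∀ p ∈ cnt.items, p.2 ≤ m := by
    intro p hp
    exact PySem.List.max?_isMax hm p.2 (List.mem_map_of_mem hp)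
  rw [show ∀ (l : List Int) (f : Int → List Int),
        l.foldl (fun ans i => ans ++ [f i]) [] = l.map f from
      fun l f => by simpa using PySem.List.foldl_append_singleton_eq_map f l []]
  apply List.ext_getElem?
  intro j
  rw [pv_outer_get m cnt.items hle]
  rw [List.getElem?_map, PySem.List.getElem?_pyRange_one, List.getElem?_replicate]
  by_cases hj : j < m.toNat
  · rw [if_pos (by omega), if_pos hj]
    simp only [Option.map_some]
    congr 1
    show List.foldl (fun (cur : List Int) (p : Int × Int) =>
          if p.2 ≥ m - (0 + (j : Int)) then cur ++ [p.1] else cur) [] cnt.items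
      = [] ++ List.map (fun x : Int × Int => x.1)
          (List.filter (fun p : Int × Int => decide (m - (j : Int) ≤ p.2 ∧ (j : Int) < m)) cnt.items)
    rw [show (fun (cur : List Int) (p : Int × Int) =>
          if p.2 ≥ m - (0 + (j : Int)) then cur ++ [p.1] else cur)
        = (fun cur p =>
          if (fun q : Int × Int => decide (m - (j : Int) ≤ q.2 ∧ (j : Int) < m)) p = true
          then cur ++ [p.1] else cur) from funext fun cur => funext fun p => by
      have hjm : (j : Int) < m := by omega
      by_cases hc : p.2 ≥ m - (0 + (j : Int))
      · rw [if_pos hc, if_pos (by simp only [decide_eq_true_eq]; omega)]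
      · rw [if_neg hc, if_neg (by simp only [decide_eq_true_eq]; omega)]]
    exact (PySem.List.foldl_append_if _ (fun p => p.1) cnt.items []).trans (List.nil_append _)
  · rw [if_neg (by omega), if_neg hj, Option.map_none]
    rfl

-- ===== VERDICT (by name: the statement is the Claim_ definition above) =====
theorem findMatrix2_spec : Claim_equal_findMatrix2 := by
  intro nums _ hpre
  exact pv_final nums hpre
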